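-- pv_equiv track=rewrite | github.com/CryAndRRich/hustack | leetcode/math/1183_Maximum_Number_of_Ones/codes/sort.py | maximumNumberOfOnes
-- ===== SOURCE A (Python) =====
-- def maximumNumberOfOnes(width: int, height: int, sideLength: int, maxOnes: int) -> int:
--     count = {}
--     for i in range(width):
--         for j in range(height):
--             key = (i % sideLength, j % sideLength)
--             count[key] = count.get(key, 0) + 1
--     freq = sorted(count.values(), reverse=True)
--     return sum(freq[:maxOnes])
-- ===== SOURCE B (Python) =====
-- def maximumNumberOfOnes(width: int, height: int, sideLength: int, maxOnes: int) -> int: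
--     # Per-residue bucket sizes computed arithmetically: O(sideLength^2) instead of O(width*height).
--     if width <= 0 or height <= 0:
--         return 0
--     s = sideLength
--     counts = []
--     for r in range(min(s, width)):
--         wc = width // s + (1 if r < width % s else 0)
--         for c in range(min(s, height)):
--             hc = height // s + (1 if c < height % s else 0)
--             counts.append(wc * hc)
--     counts.sort(reverse=True)
--     return sum(counts[:maxOnes])
-- ===== Notes on version B (the rewrite author's own statement) =====
-- stated objective: faster
-- what changed: B replaces the O(width*height) counting loop over every cell with a closed-form per-residue bucket size (width//s plus a remainder correction, times the same for height) over at most sideLength x sideLength residue classes.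
-- outside the precondition, e.g. on maximumNumberOfOnes(2, 2, -2, 3): A returns 3, B returns 0
import Mathlib
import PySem

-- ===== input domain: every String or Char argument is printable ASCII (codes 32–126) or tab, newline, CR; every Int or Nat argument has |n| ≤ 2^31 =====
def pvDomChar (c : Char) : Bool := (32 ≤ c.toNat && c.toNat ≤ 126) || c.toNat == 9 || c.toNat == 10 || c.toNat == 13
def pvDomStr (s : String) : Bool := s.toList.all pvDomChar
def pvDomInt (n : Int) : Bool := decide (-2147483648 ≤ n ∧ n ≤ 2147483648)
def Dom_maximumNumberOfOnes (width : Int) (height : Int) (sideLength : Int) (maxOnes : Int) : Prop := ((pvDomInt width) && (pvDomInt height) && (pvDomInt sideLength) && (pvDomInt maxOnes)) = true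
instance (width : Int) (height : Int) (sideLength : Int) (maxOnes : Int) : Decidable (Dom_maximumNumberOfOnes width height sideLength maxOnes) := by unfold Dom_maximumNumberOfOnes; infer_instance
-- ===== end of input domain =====

-- B computes each residue-class bucket size in closed form (width//s plus a remainder correction,
-- times the same for height) over the residue grid, instead of A's cell-by-cell counting loop: faster.

-- ===== PORT A =====
def maximumNumberOfOnes (width : Int) (height : Int) (sideLength : Int) (maxOnes : Int) : Int :=
  let count := (PySem.List.pyRange 0 width 1).foldl (fun d i =>
      (PySem.List.pyRange 0 height 1).foldl (fun d j =>
        let key := (PySem.Int.mod i sideLength, PySem.Int.mod j sideLength)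
        d.insert key (d.getD key 0 + 1)) d) PySem.Dict.empty
  let freq := PySem.List.sorted count.values (fun x => x) true
  (PySem.List.slice freq none (some maxOnes)).sum

-- ===== PORT B =====
def maximumNumberOfOnes_alt (width : Int) (height : Int) (sideLength : Int) (maxOnes : Int) : Int :=
  if width ≤ 0 ∨ height ≤ 0 then 0
  else
    let counts := (PySem.List.pyRange 0 (min sideLength width) 1).foldl (fun acc r =>
        let wc := PySem.Int.floordiv width sideLength +
          (if r < PySem.Int.mod width sideLength then 1 else 0)
        (PySem.List.pyRange 0 (min sideLength height) 1).foldl (fun acc c =>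
          let hc := PySem.Int.floordiv height sideLength +
            (if c < PySem.Int.mod height sideLength then 1 else 0)
          acc ++ [wc * hc]) acc) []
    (PySem.List.slice (PySem.List.sorted counts (fun x => x) true) none (some maxOnes)).sum

-- ===== PRECONDITION & SPEC =====
-- Pre_ restricts to the problem's natural domain: a positive sideLength whenever the grid is
-- non-empty.  It excludes sideLength = 0 with a non-empty grid, where A raises ZeroDivisionError,
-- and negative sideLength with a non-empty grid, which is outside the problem's natural domain
-- (A then buckets by Python's negative-divisor residues while B's range over sideLength is empty).
def Pre_maximumNumberOfOnes (width : Int) (height : Int) (sideLength : Int) (maxOnes : Int) : Prop :=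
  width ≤ 0 ∨ height ≤ 0 ∨ 0 < sideLength
instance (width : Int) (height : Int) (sideLength : Int) (maxOnes : Int) : Decidable (Pre_maximumNumberOfOnes width height sideLength maxOnes) := by unfold Pre_maximumNumberOfOnes; infer_instance
def pvWitness_maximumNumberOfOnes : Int × Int × Int × Int := (4, 3, 2, 1)

def Spec_maximumNumberOfOnes (width : Int) (height : Int) (sideLength : Int) (maxOnes : Int) (out : Int) : Prop := out = maximumNumberOfOnes_alt width height sideLength maxOnes
instance (width : Int) (height : Int) (sideLength : Int) (maxOnes : Int) (out : Int) : Decidable (Spec_maximumNumberOfOnes width height sideLength maxOnes out) := by unfold Spec_maximumNumberOfOnes; infer_instance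

-- ===== CLAIM (what is proved, stated in full; the proofs are below) =====
def Claim_equal_maximumNumberOfOnes : Prop := ∀ (width : Int) (height : Int) (sideLength : Int) (maxOnes : Int), Dom_maximumNumberOfOnes width height sideLength maxOnes → Pre_maximumNumberOfOnes width height sideLength maxOnes → Spec_maximumNumberOfOnes width height sideLength maxOnes (maximumNumberOfOnes width height sideLength maxOnes)

-- ===== LEMMAS AND PROOFS =====

-- a fold of inner folds over g i is a fold over the flatMap
theorem pv_foldl_flatMap {α β γ : Type} (l : List α) (g : α → List β) (f : γ → β → γ) (init : γ) :
    (l.flatMap g).foldl f init = l.foldl (fun d i => (g i).foldl f d) init := by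
  induction l generalizing init with
  | nil => rfl
  | cons x xs ih => simp [List.flatMap_cons, List.foldl_append, ih]

-- a fold appending blocks g i is init ++ flatMap
theorem pv_foldl_append_flatMap {α β : Type} (l : List α) (g : α → List β) (init : List β) :
    l.foldl (fun acc i => acc ++ g i) init = init ++ l.flatMap g := by
  induction l generalizing init with
  | nil => simp
  | cons x xs ih => simp [List.flatMap_cons, ih]

theorem pv_count_flatMap {α β : Type} [BEq β] (l : List α) (g : α → List β) (x : β) :
    (l.flatMap g).count x = (l.map (fun a => (g a).count x)).sum := by
  induction l with
  | nil => rfl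
  | cons a as ih => simp [List.flatMap_cons, List.count_append, ih]

theorem pv_sum_map_ite {α : Type} (l : List α) (p : α → Prop) [DecidablePred p] (K : Nat) :
    (l.map (fun x => if p x then K else 0)).sum = l.countP (fun x => decide (p x)) * K := by
  induction l with
  | nil => simp
  | cons a as ih =>
    by_cases h : p a <;> simp [h, ih, Nat.add_mul, Nat.add_comm]

-- the closed-form residue count: #{ i ∈ [0,w) : i % s = r } = w//s + (1 if r < w%s else 0)
theorem pv_residue_count (s w r : Int) (hs : 0 < s) (hr0 : 0 ≤ r) (hrs : r < s) (hw : 0 ≤ w) :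
    (((PySem.List.pyRange 0 w 1).countP (fun i => decide (PySem.Int.mod i s = r))) : Int)
      = PySem.Int.floordiv w s + (if r < PySem.Int.mod w s then 1 else 0) := by
  induction w, hw using Int.le_induction with
  | base =>
    rw [PySem.List.pyRange_one_eq_nil le_rfl, PySem.Int.floordiv_eq_ediv_of_pos hs,
      PySem.Int.mod_eq_emod_of_pos hs]
    simp
    omega
  | succ w hw ih =>
    rw [PySem.List.pyRange_one_succ_right hw, List.countP_append]
    simp only [List.countP_cons, List.countP_nil, decide_eq_true_eq]
    push_cast
    rw [ih]
    simp only [PySem.Int.floordiv_eq_ediv_of_pos hs, PySem.Int.mod_eq_emod_of_pos hs]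
    have hd : s * (w / s) + w % s = w := Int.ediv_add_emod w s
    have h1 : 0 ≤ w % s := Int.emod_nonneg w (by omega)
    have h2 : w % s < s := Int.emod_lt_of_pos w hs
    by_cases hm : w % s = s - 1
    · have h3 := (Int.ediv_emod_unique (a := w + 1) (b := s) (q := w / s + 1) (r := 0) hs).mpr
        ⟨by linarith, le_refl 0, hs⟩
      rw [h3.1, h3.2, hm]
      generalize w / s = a
      split_ifs <;> omega
    · have h3 := (Int.ediv_emod_unique (a := w + 1) (b := s) (q := w / s) (r := w % s + 1) hs).mpr
        ⟨by linarith, by omega, by omega⟩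
      rw [h3.1, h3.2]
      generalize w / s = a
      generalize hB : w % s = b at *
      split_ifs <;> omega

-- residues attained by [0,w) are exactly [0, min s w)
theorem pv_residue_mem (s w x : Int) (hs : 0 < s) (hw : 0 < w) :
    (∃ i, (0 ≤ i ∧ i < w) ∧ PySem.Int.mod i s = x) ↔ 0 ≤ x ∧ x < min s w := by
  constructor
  · rintro ⟨i, ⟨hi0, hiw⟩, rfl⟩
    have h1 := PySem.Int.mod_nonneg (a := i) hs
    have h2 := PySem.Int.mod_lt (a := i) hs
    refine ⟨h1, ?_⟩
    rcases le_or_gt s w with h | h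
    · omega
    · have : PySem.Int.mod i s = i := by
        rw [PySem.Int.mod_eq_emod_of_pos hs]
        exact Int.emod_eq_of_lt hi0 (by omega)
      omega
  · rintro ⟨h0, h1⟩
    refine ⟨x, ⟨h0, by omega⟩, ?_⟩
    rw [PySem.Int.mod_eq_emod_of_pos hs]
    exact Int.emod_eq_of_lt h0 (by omega)

-- sorted(·, reverse=True) depends only on the multiset
theorem pv_sorted_rev_congr (xs ys : List Int) (h : xs.Perm ys) :
    PySem.List.sorted xs (fun x => x) true = PySem.List.sorted ys (fun x => x) true := by
  apply PySem.List.eq_of_perm_of_pairwise_le_of_injective (fun x : Int => -x) neg_injective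
  · exact ((PySem.List.sorted_perm _ _ _).trans h).trans (PySem.List.sorted_perm _ _ _).symm
  · exact (PySem.List.sorted_pairwise_rev xs (fun x => x)).imp (fun h => by simpa using h)
  · exact (PySem.List.sorted_pairwise_rev ys (fun x => x)).imp (fun h => by simpa using h)

-- the inner row of A's key list counts a pair componentwise
theorem pv_inner_count (h s i r c : Int) :
    ((PySem.List.pyRange 0 h 1).map (fun j => (PySem.Int.mod i s, PySem.Int.mod j s))).count (r, c)
    = if PySem.Int.mod i s = r then
        (PySem.List.pyRange 0 h 1).countP (fun j => decide (PySem.Int.mod j s = c)) else 0 := by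
  rw [List.count_eq_countP, List.countP_map]
  by_cases hir : PySem.Int.mod i s = r
  · rw [if_pos hir]
    apply List.countP_congr
    intro j _
    simp [Function.comp, Prod.ext_iff, hir]
  · rw [if_neg hir]
    rw [List.countP_eq_zero]
    intro j _
    simp [Function.comp, Prod.ext_iff]
    intro hc
    exact absurd hc hir

-- the main case: non-empty grid, positive side length
theorem pv_main (w h s m : Int) (hw : 0 < w) (hh : 0 < h) (hs : 0 < s) :
    maximumNumberOfOnes w h s m = maximumNumberOfOnes_alt w h s m := by
  unfold maximumNumberOfOnes maximumNumberOfOnes_alt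
  rw [if_neg (by omega)]
  -- A's dict is the counter of the flattened key list L
  have hdict : ((PySem.List.pyRange 0 w 1).foldl (fun d i =>
      (PySem.List.pyRange 0 h 1).foldl (fun d j =>
        let key := (PySem.Int.mod i s, PySem.Int.mod j s)
        d.insert key (d.getD key 0 + 1)) d) PySem.Dict.empty)
    = PySem.Dict.counter ((PySem.List.pyRange 0 w 1).flatMap
        (fun i => (PySem.List.pyRange 0 h 1).map (fun j => (PySem.Int.mod i s, PySem.Int.mod j s)))) := by
    rw [← PySem.Dict.foldl_insert_getD_add_one_eq_counter, pv_foldl_flatMap]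
    simp only [List.foldl_map]
  rw [hdict]
  simp only []
  -- its values are the per-key multiplicities over the distinct keys
  rw [show (PySem.Dict.counter ((PySem.List.pyRange 0 w 1).flatMap
        (fun i => (PySem.List.pyRange 0 h 1).map (fun j => (PySem.Int.mod i s, PySem.Int.mod j s))))).values
    = (PySem.Set.ofList ((PySem.List.pyRange 0 w 1).flatMap
        (fun i => (PySem.List.pyRange 0 h 1).map (fun j => (PySem.Int.mod i s, PySem.Int.mod j s))))).map
        (fun k => ((((PySem.List.pyRange 0 w 1).flatMap
        (fun i => (PySem.List.pyRange 0 h 1).map (fun j => (PySem.Int.mod i s, PySem.Int.mod j s)))).count k : Int)))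
    from by simp [PySem.Dict.values, PySem.Dict.items_counter, List.map_map, Function.comp]]
  -- B's nested append loop is the mapped residue product
  rw [show ((PySem.List.pyRange 0 (min s w) 1).foldl (fun acc r =>
        let wc := PySem.Int.floordiv w s + (if r < PySem.Int.mod w s then 1 else 0)
        (PySem.List.pyRange 0 (min s h) 1).foldl (fun acc c =>
          let hc := PySem.Int.floordiv h s + (if c < PySem.Int.mod h s then 1 else 0)
          acc ++ [wc * hc]) acc) [])
    = ((PySem.List.pyRange 0 (min s w) 1).flatMap
        (fun r => (PySem.List.pyRange 0 (min s h) 1).map (fun c => (r, c)))).map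
        (fun p => (PySem.Int.floordiv w s + (if p.1 < PySem.Int.mod w s then 1 else 0)) *
                  (PySem.Int.floordiv h s + (if p.2 < PySem.Int.mod h s then 1 else 0)))
    from by
      simp only [PySem.List.foldl_append_singleton_eq_map, List.map_flatMap, List.map_map]
      rw [pv_foldl_append_flatMap]
      rfl]
  -- the two value lists are permutations of each other; sorted(·, reverse) agrees
  have hperm : (PySem.Set.ofList ((PySem.List.pyRange 0 w 1).flatMap
      (fun i => (PySem.List.pyRange 0 h 1).map (fun j => (PySem.Int.mod i s, PySem.Int.mod j s))))).Perm
      ((PySem.List.pyRange 0 (min s w) 1).flatMap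
        (fun r => (PySem.List.pyRange 0 (min s h) 1).map (fun c => (r, c)))) := by
    refine (List.perm_ext_iff_of_nodup (PySem.Set.nodup_ofList _) ?_).mpr ?_
    · exact List.Nodup.product (PySem.List.nodup_pyRange_one _ _) (PySem.List.nodup_pyRange_one _ _)
    intro x
    rw [PySem.Set.mem_ofList]
    obtain ⟨x1, x2⟩ := x
    simp only [List.mem_flatMap, List.mem_map, PySem.List.mem_pyRange_one, Prod.mk.injEq]
    constructor
    · rintro ⟨i, hi, j, hj, rfl, rfl⟩
      have h1 := (pv_residue_mem s w (PySem.Int.mod i s) hs hw).mp ⟨i, hi, rfl⟩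
      have h2 := (pv_residue_mem s h (PySem.Int.mod j s) hs hh).mp ⟨j, hj, rfl⟩
      exact ⟨_, ⟨h1.1, h1.2⟩, _, ⟨h2.1, h2.2⟩, rfl, rfl⟩
    · rintro ⟨r, hr, c, hc, rfl, rfl⟩
      obtain ⟨i, hi, hie⟩ := (pv_residue_mem s w r hs hw).mpr ⟨hr.1, hr.2⟩
      obtain ⟨j, hj, hje⟩ := (pv_residue_mem s h c hs hh).mpr ⟨hc.1, hc.2⟩
      exact ⟨i, hi, j, hj, hie, hje⟩
  rw [pv_sorted_rev_congr _ _ ((hperm.map _).trans (List.Perm.of_eq (List.map_congr_left ?_)))]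
  rintro ⟨r, c⟩ hmem
  simp only [List.mem_flatMap, List.mem_map, PySem.List.mem_pyRange_one, Prod.mk.injEq] at hmem
  obtain ⟨r', hr', c', hc', h1, h2⟩ := hmem
  subst h1; subst h2
  -- multiplicity of (r, c) in L is the product of the residue counts
  rw [pv_count_flatMap]
  have : ((PySem.List.pyRange 0 w 1).map (fun i =>
      (((PySem.List.pyRange 0 h 1).map (fun j => (PySem.Int.mod i s, PySem.Int.mod j s))).count (r', c')))).sum
      = (((PySem.List.pyRange 0 w 1).countP (fun i => decide (PySem.Int.mod i s = r'))) *
         ((PySem.List.pyRange 0 h 1).countP (fun j => decide (PySem.Int.mod j s = c')))) := by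
    rw [show ((PySem.List.pyRange 0 w 1).map (fun i =>
      (((PySem.List.pyRange 0 h 1).map (fun j => (PySem.Int.mod i s, PySem.Int.mod j s))).count (r', c'))))
      = ((PySem.List.pyRange 0 w 1).map (fun i =>
        if PySem.Int.mod i s = r' then
          (PySem.List.pyRange 0 h 1).countP (fun j => decide (PySem.Int.mod j s = c')) else 0))
      from List.map_congr_left (fun i _ => pv_inner_count h s i r' c')]
    exact pv_sum_map_ite _ _ _
  rw [this]
  push_cast
  rw [pv_residue_count s w r' hs hr'.1 (by omega) (by omega),
      pv_residue_count s h c' hs hc'.1 (by omega) (by omega)]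

-- ===== VERDICT (by name: the statement is the Claim_ definition above) =====
theorem maximumNumberOfOnes_spec : Claim_equal_maximumNumberOfOnes := by
  intro w h s m _ hpre
  unfold Spec_maximumNumberOfOnes
  rcases lt_or_ge 0 w with hw | hw
  · rcases lt_or_ge 0 h with hh | hh
    · have hs : 0 < s := by
        unfold Pre_maximumNumberOfOnes at hpre
        omega
      exact pv_main w h s m hw hh hs
    · -- height ≤ 0: the grid is empty on both sides
      unfold maximumNumberOfOnes maximumNumberOfOnes_alt
      rw [if_pos (by omega)]
      rw [show (PySem.List.pyRange 0 h 1) = [] from PySem.List.pyRange_one_eq_nil (by omega)]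
      simp [PySem.List.sorted, PySem.List.slice, PySem.Dict.values, PySem.Dict.empty]
  · -- width ≤ 0: the grid is empty on both sides
    unfold maximumNumberOfOnes maximumNumberOfOnes_alt
    rw [if_pos (by omega)]
    rw [show (PySem.List.pyRange 0 w 1) = [] from PySem.List.pyRange_one_eq_nil (by omega)]
    simp [PySem.List.sorted, PySem.List.slice, PySem.Dict.values, PySem.Dict.empty]
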